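-- pv_equiv track=rewrite | github.com/iclue-summer-2020/quasi-key-tableaux | qkt-server/swaps.py | lswap
-- ===== SOURCE A (Python) =====
-- def lswap(ax):
--   '''
--   Returns all possible left swaps iteratively.
--   Since the number of left swaps can be factorial in the length of `ax`,
--   this function can be slow.
--   '''
--   possible = set()
--   seen = set()
--   n = len(ax)
--   comp = list(ax)
--
--   def _lswap(i):
--     tcomp = tuple(comp)
--     if (tcomp, i) in seen: return
--     possible.add(tcomp)
--     seen.add((tcomp, i))
--
--     if i >= n: return
--
--     _lswap(i+1)
--     for j in range(i+1, n):
--       if comp[i] < comp[j]: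
--         oci, ocj = comp[i], comp[j]
--         comp[i], comp[j] = comp[j], comp[i]
--         _lswap(0)
--         comp[i], comp[j] = oci, ocj
--     return
--
--   _lswap(0)
--   return possible
-- ===== SOURCE B (Python) =====
-- def lswap(ax):
--   '''
--   Returns all possible left swaps, via an explicit worklist instead of recursion.
--   '''
--   n = len(ax)
--   possible = set()
--   seen = set()
--   stack = [(tuple(ax), 0)]
--   while stack:
--     config, i = stack.pop()
--     if (config, i) in seen:
--       continue
--     possible.add(config)
--     seen.add((config, i))
--     if i >= n:
--       continue
--     children = []
--     for j in range(i + 1, n):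
--       if config[i] < config[j]:
--         c2 = list(config)
--         c2[i], c2[j] = c2[j], c2[i]
--         children.append((tuple(c2), 0))
--     stack.extend(reversed(children))
--     stack.append((config, i + 1))
--   return possible
-- ===== Notes on version B (the rewrite author's own statement) =====
-- stated objective: alternative
-- what changed: A's recursive DFS (nested function mutating a shared comp list, recursion after each swap) is replaced by an iterative worklist loop with an explicit stack of (config, i) states and the same seen-set memoisation; successors are pushed so the reachable set (and first-visit order) is identical.
import Mathlib
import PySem

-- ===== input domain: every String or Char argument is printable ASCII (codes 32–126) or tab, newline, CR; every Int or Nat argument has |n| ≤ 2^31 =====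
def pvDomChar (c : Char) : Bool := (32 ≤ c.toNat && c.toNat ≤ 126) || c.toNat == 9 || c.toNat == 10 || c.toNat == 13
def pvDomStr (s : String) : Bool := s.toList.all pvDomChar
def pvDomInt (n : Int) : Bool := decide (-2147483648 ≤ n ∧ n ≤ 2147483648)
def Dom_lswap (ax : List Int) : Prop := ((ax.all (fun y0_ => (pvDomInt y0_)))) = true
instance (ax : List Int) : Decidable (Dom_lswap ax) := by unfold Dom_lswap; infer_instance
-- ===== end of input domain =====

-- B replaces A's recursive DFS by an explicit worklist (stack) loop with the same
-- seen-set memoisation; same reachable-set computation, different decomposition.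

-- ===== PORT A =====
-- comp[i], comp[j] = comp[j], comp[i] (both indices are in range wherever used)
def pvSwap (c : List Int) (i j : Nat) : List Int :=
  (c.set i (c.getD j 0)).set j (c.getD i 0)

-- the inner recursive `_lswap`, with the mutated state (possible, seen) threaded
-- explicitly and a fuel counter as a totality guard (the top-level fuel is proved
-- sufficient below, so `lswap` computes exactly what the Python computes)
def lswapGo (n : Nat) :
    Nat → List Int → Nat → PySem.Set (List Int) → PySem.Set (List Int × Nat) →
    Option (PySem.Set (List Int) × PySem.Set (List Int × Nat))
  | 0, _, _, _, _ => none
  | fuel + 1, c, i, P, S =>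
    if (c, i) ∈ S then some (P, S)
    else
      let P' := PySem.Set.add P c
      let S' := PySem.Set.add S (c, i)
      if n ≤ i then some (P', S')
      else
        match lswapGo n fuel c (i + 1) P' S' with
        | none => none
        | some r =>
          (List.range' (i + 1) (n - (i + 1))).foldl
            (fun acc j =>
              match acc with
              | none => none
              | some (P, S) =>
                if c.getD i 0 < c.getD j 0 then lswapGo n fuel (pvSwap c i j) 0 P S
                else some (P, S))
            (some r)

def lswap (ax : List Int) : List (List Int) :=
  match lswapGo ax.length (ax.permutations.dedup.length * (ax.length + 1) + 1)
      ax 0 PySem.Set.empty PySem.Set.empty with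
  | some (P, _) => P
  | none => []

-- ===== PORT B =====
-- finite universe of states reachable in principle: permutations of ax × positions
def pvUni (ax : List Int) : List (List Int × Nat) :=
  ax.permutations.dedup ×ˢ List.range (ax.length + 1)

-- number of universe states not yet seen (termination measure for the worklist loop)
def pvMu (ax : List Int) (S : List (List Int × Nat)) : Nat :=
  ((pvUni ax).filter (fun s => decide (s ∉ S))).length

def pvChildFn (c : List Int) (i : Nat) : Nat → Option (List Int × Nat) :=
  fun j => if c.getD i 0 < c.getD j 0 then some (pvSwap c i j, 0) else none

-- the `children` list built in B's loop body
def pvChildren (n : Nat) (c : List Int) (i : Nat) : List (List Int × Nat) :=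
  (List.range' (i + 1) (n - (i + 1))).filterMap (pvChildFn c i)

theorem pvConsSetPerm (a : Int) : ∀ (t : List Int) (k : Nat), k < t.length →
    (t.getD k 0 :: t.set k a).Perm (a :: t) := by
  intro t
  induction t with
  | nil => intro k hk; simp at hk
  | cons b s ih =>
    intro k hk
    cases k with
    | zero => simpa using List.Perm.swap a b s
    | succ k =>
      have hk' : k < s.length := by simpa using hk
      have h1 := ih k hk'
      exact (List.Perm.swap b (s.getD k 0) (s.set k a)).trans
        ((List.Perm.cons b h1).trans (List.Perm.swap a b s))

theorem pvSwap_perm : ∀ (c : List Int) (i j : Nat), i < j → j < c.length →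
    (pvSwap c i j).Perm c := by
  intro c
  induction c with
  | nil => intro i j _ hj; simp at hj
  | cons a t ih =>
    intro i j hij hj
    cases i with
    | zero =>
      cases j with
      | zero => omega
      | succ k =>
        have hk : k < t.length := by simpa using hj
        have : pvSwap (a :: t) 0 (k + 1) = t.getD k 0 :: t.set k a := by
          simp [pvSwap]
        rw [this]
        exact pvConsSetPerm a t k hk
    | succ i' =>
      cases j with
      | zero => omega
      | succ j' =>
        have : pvSwap (a :: t) (i' + 1) (j' + 1) = a :: pvSwap t i' j' := by
          simp [pvSwap]
        rw [this]
        exact List.Perm.cons a (ih i' j' (by omega) (by simpa using hj))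

theorem pvFilterLenMono {α : Type} (p q : α → Bool) (himp : ∀ a, p a = true → q a = true) :
    ∀ (l : List α), (l.filter p).length ≤ (l.filter q).length := by
  intro l
  induction l with
  | nil => simp
  | cons a t ih =>
    by_cases hp : p a = true
    · simp [List.filter, hp, himp a hp]; omega
    · simp only [List.filter, Bool.not_eq_true] at *
      rw [hp]
      cases hq : q a <;> simp <;> omega

theorem pvFilterLenLt {α : Type} (p q : α → Bool) (x : α)
    (himp : ∀ a, p a = true → q a = true) (hpx : p x = false) (hqx : q x = true) :
    ∀ (l : List α), x ∈ l → (l.filter p).length < (l.filter q).length := by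
  intro l
  induction l with
  | nil => simp
  | cons a t ih =>
    intro hx
    rcases List.mem_cons.mp hx with rfl | hx
    · simp only [List.filter, hpx, hqx]
      have := pvFilterLenMono p q himp t
      simp; omega
    · have := ih hx
      by_cases hp : p a = true
      · simp [List.filter, hp, himp a hp]; omega
      · simp only [List.filter, Bool.not_eq_true] at *
        rw [hp]
        cases hq : q a <;> simp <;> omega

theorem pvMu_add_lt (ax : List Int) (S : List (List Int × Nat)) (x : List Int × Nat)
    (hx : x ∈ pvUni ax) (hxS : x ∉ S) :
    pvMu ax (PySem.Set.add S x) < pvMu ax S := by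
  apply pvFilterLenLt _ _ x _ _ _ _ hx
  · intro a ha
    simp only [decide_eq_true_eq] at *
    intro haS
    exact ha ((PySem.Set.mem_add S x a).mpr (Or.inl haS))
  · simp [PySem.Set.mem_add]
  · simpa using hxS

theorem pvMem_pvUni (ax c : List Int) (i : Nat) :
    (c, i) ∈ pvUni ax ↔ c.Perm ax ∧ i < ax.length + 1 := by
  simp [pvUni, List.mem_product, List.mem_dedup, List.mem_permutations, List.mem_range]

theorem pvChildren_mem_uni (ax c : List Int) (i : Nat) (hc : c.Perm ax) (hi : i < ax.length) :
    ∀ s ∈ pvChildren ax.length c i, s ∈ pvUni ax := by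
  intro s hs
  simp only [pvChildren, List.mem_filterMap, pvChildFn] at hs
  obtain ⟨j, hj, hjs⟩ := hs
  split at hjs
  · cases hjs
    have hj' : i + 1 ≤ j ∧ j < i + 1 + (ax.length - (i + 1)) := List.mem_range'_1.mp hj
    have hjlt : j < c.length := by rw [hc.length_eq]; omega
    exact (pvMem_pvUni ax _ 0).mpr ⟨(pvSwap_perm c i j (by omega) hjlt).trans hc, by omega⟩
  · cases hjs

-- B's worklist loop: pop a state; skip it if seen, otherwise record it and push
-- its successors ((c,i+1) on top, then the swap-successors in increasing j)
def lswapAltGo (ax : List Int) (stack : List (List Int × Nat))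
    (hst : ∀ s ∈ stack, s ∈ pvUni ax)
    (P : PySem.Set (List Int)) (S : PySem.Set (List Int × Nat)) : PySem.Set (List Int) :=
  match stack with
  | [] => P
  | (c, i) :: rest =>
    if hS : (c, i) ∈ S then
      lswapAltGo ax rest (fun s hs => hst s (List.mem_cons_of_mem _ hs)) P S
    else
      if hn : ax.length ≤ i then
        lswapAltGo ax rest (fun s hs => hst s (List.mem_cons_of_mem _ hs))
          (PySem.Set.add P c) (PySem.Set.add S (c, i))
      else
        lswapAltGo ax ((c, i + 1) :: pvChildren ax.length c i ++ rest)
          (by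
            intro s hs
            rcases List.mem_cons.mp hs with rfl | hs
            · have := hst (c, i) (List.mem_cons_self)
              have h' := (pvMem_pvUni ax c i).mp this
              exact (pvMem_pvUni ax c (i + 1)).mpr ⟨h'.1, by omega⟩
            · rcases List.mem_append.mp hs with hs | hs
              · have := hst (c, i) (List.mem_cons_self)
                have h' := (pvMem_pvUni ax c i).mp this
                exact pvChildren_mem_uni ax c i h'.1 (by omega) s hs
              · exact hst s (List.mem_cons_of_mem _ hs))
          (PySem.Set.add P c) (PySem.Set.add S (c, i))
  termination_by (pvMu ax S, stack.length)
  decreasing_by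
  · exact Prod.Lex.right _ (by simp)
  · exact Prod.Lex.left _ _ (pvMu_add_lt ax S (c, i) (hst (c, i) (List.mem_cons_self)) hS)
  · exact Prod.Lex.left _ _ (pvMu_add_lt ax S (c, i) (hst (c, i) (List.mem_cons_self)) hS)

def lswap_alt (ax : List Int) : List (List Int) :=
  lswapAltGo ax [(ax, 0)]
    (by
      intro s hs
      rcases List.mem_cons.mp hs with rfl | hs
      · exact (pvMem_pvUni ax ax 0).mpr ⟨List.Perm.refl ax, by omega⟩
      · simp at hs)
    PySem.Set.empty PySem.Set.empty

-- ===== PRECONDITION & SPEC =====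
def Spec_lswap (ax : List Int) (out : List (List Int)) : Prop := out = lswap_alt ax
instance (ax : List Int) (out : List (List Int)) : Decidable (Spec_lswap ax out) := by unfold Spec_lswap; infer_instance

-- ===== CLAIM (what is proved, stated in full; the proofs are below) =====
def Claim_equal_lswap : Prop := ∀ (ax : List Int), Dom_lswap ax → Spec_lswap ax (lswap ax)

-- ===== LEMMAS AND PROOFS =====

-- the body of A's inner `for j` loop, as a named step function (for the proofs)
def pvStep (n m : Nat) (c : List Int) (i : Nat)
    (acc : Option (PySem.Set (List Int) × PySem.Set (List Int × Nat))) (j : Nat) :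
    Option (PySem.Set (List Int) × PySem.Set (List Int × Nat)) :=
  match acc with
  | none => none
  | some (P, S) =>
    if c.getD i 0 < c.getD j 0 then lswapGo n m (pvSwap c i j) 0 P S
    else some (P, S)

theorem lswapGo_succ (n m : Nat) (c : List Int) (i : Nat)
    (P : PySem.Set (List Int)) (S : PySem.Set (List Int × Nat)) :
    lswapGo n (m + 1) c i P S =
      if (c, i) ∈ S then some (P, S)
      else
        if n ≤ i then some (PySem.Set.add P c, PySem.Set.add S (c, i))
        else
          match lswapGo n m c (i + 1) (PySem.Set.add P c) (PySem.Set.add S (c, i)) with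
          | none => none
          | some r => (List.range' (i + 1) (n - (i + 1))).foldl (pvStep n m c i) (some r) := rfl

theorem foldl_pvStep_none (n m : Nat) (c : List Int) (i : Nat) :
    ∀ js : List Nat, js.foldl (pvStep n m c i) none = none := by
  intro js
  induction js with
  | nil => rfl
  | cons j js ih => simpa [pvStep] using ih

theorem lswapAltGo_nil (ax : List Int) (h : ∀ s ∈ ([] : List (List Int × Nat)), s ∈ pvUni ax)
    (P : PySem.Set (List Int)) (S : PySem.Set (List Int × Nat)) :
    lswapAltGo ax [] h P S = P := by
  rw [lswapAltGo]

theorem lswapAltGo_skip (ax : List Int) (c : List Int) (i : Nat)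
    (rest : List (List Int × Nat)) (h : ∀ s ∈ (c, i) :: rest, s ∈ pvUni ax)
    (h' : ∀ s ∈ rest, s ∈ pvUni ax)
    (P : PySem.Set (List Int)) (S : PySem.Set (List Int × Nat)) (hS : (c, i) ∈ S) :
    lswapAltGo ax ((c, i) :: rest) h P S = lswapAltGo ax rest h' P S := by
  rw [lswapAltGo]
  simp [hS]

theorem lswapAltGo_stop (ax : List Int) (c : List Int) (i : Nat)
    (rest : List (List Int × Nat)) (h : ∀ s ∈ (c, i) :: rest, s ∈ pvUni ax)
    (h' : ∀ s ∈ rest, s ∈ pvUni ax)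
    (P : PySem.Set (List Int)) (S : PySem.Set (List Int × Nat)) (hS : (c, i) ∉ S)
    (hn : ax.length ≤ i) :
    lswapAltGo ax ((c, i) :: rest) h P S =
      lswapAltGo ax rest h' (PySem.Set.add P c) (PySem.Set.add S (c, i)) := by
  rw [lswapAltGo]
  simp [hS, hn]

theorem lswapAltGo_push (ax : List Int) (c : List Int) (i : Nat)
    (rest : List (List Int × Nat)) (h : ∀ s ∈ (c, i) :: rest, s ∈ pvUni ax)
    (h' : ∀ s ∈ (c, i + 1) :: pvChildren ax.length c i ++ rest, s ∈ pvUni ax)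
    (P : PySem.Set (List Int)) (S : PySem.Set (List Int × Nat)) (hS : (c, i) ∉ S)
    (hn : ¬ ax.length ≤ i) :
    lswapAltGo ax ((c, i) :: rest) h P S =
      lswapAltGo ax ((c, i + 1) :: pvChildren ax.length c i ++ rest) h'
        (PySem.Set.add P c) (PySem.Set.add S (c, i)) := by
  rw [lswapAltGo]
  simp [hS, hn]

theorem pvFold_seen (n m : Nat) (c : List Int) (i : Nat)
    (H : ∀ (c0 : List Int) (i0 : Nat) P0 S0 P1 S1,
      lswapGo n m c0 i0 P0 S0 = some (P1, S1) → ∀ x ∈ S0, x ∈ S1) :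
    ∀ (js : List Nat) P0 S0 P' S',
      js.foldl (pvStep n m c i) (some (P0, S0)) = some (P', S') → ∀ x ∈ S0, x ∈ S' := by
  intro js
  induction js with
  | nil =>
    intro P0 S0 P' S' h
    simp only [List.foldl_nil, Option.some.injEq, Prod.mk.injEq] at h
    obtain ⟨rfl, rfl⟩ := h
    exact fun x hx => hx
  | cons j js ih =>
    intro P0 S0 P' S' h
    simp only [List.foldl_cons] at h
    by_cases hcnd : c.getD i 0 < c.getD j 0
    · simp only [pvStep, if_pos hcnd] at h
      cases hgo : lswapGo n m (pvSwap c i j) 0 P0 S0 with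
      | none => rw [hgo, foldl_pvStep_none] at h; exact absurd h (by simp)
      | some r2 =>
        obtain ⟨P2, S2⟩ := r2
        rw [hgo] at h
        exact fun x hx => ih P2 S2 P' S' h x (H _ _ _ _ _ _ hgo x hx)
    · simp only [pvStep, if_neg hcnd] at h
      exact ih P0 S0 P' S' h

theorem lswapGo_seen (n : Nat) : ∀ (m : Nat) (c : List Int) (i : Nat)
    (P : PySem.Set (List Int)) (S : PySem.Set (List Int × Nat)) P' S',
    lswapGo n m c i P S = some (P', S') → ∀ x ∈ S, x ∈ S' := by
  intro m
  induction m with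
  | zero => intro c i P S P' S' h; simp [lswapGo] at h
  | succ m ih =>
    intro c i P S P' S' h
    rw [lswapGo_succ] at h
    by_cases hS : (c, i) ∈ S
    · rw [if_pos hS] at h
      simp only [Option.some.injEq, Prod.mk.injEq] at h
      obtain ⟨rfl, rfl⟩ := h
      exact fun x hx => hx
    · rw [if_neg hS] at h
      have hadd : ∀ x ∈ S, x ∈ PySem.Set.add S (c, i) :=
        fun x hx => (PySem.Set.mem_add S (c, i) x).mpr (Or.inl hx)
      by_cases hn : n ≤ i
      · rw [if_pos hn] at h
        simp only [Option.some.injEq, Prod.mk.injEq] at h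
        obtain ⟨rfl, rfl⟩ := h
        exact hadd
      · rw [if_neg hn] at h
        cases hgo : lswapGo n m c (i + 1) (PySem.Set.add P c) (PySem.Set.add S (c, i)) with
        | none => rw [hgo] at h; exact absurd h (by simp)
        | some r1 =>
          obtain ⟨P1, S1⟩ := r1
          rw [hgo] at h
          exact fun x hx =>
            pvFold_seen n m c i ih _ P1 S1 P' S' h x (ih _ _ _ _ _ _ hgo x (hadd x hx))

theorem pvMu_mono (ax : List Int) (S S' : List (List Int × Nat))
    (h : ∀ x ∈ S, x ∈ S') : pvMu ax S' ≤ pvMu ax S := by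
  apply pvFilterLenMono
  intro a ha
  simp only [decide_eq_true_eq] at *
  exact fun haS => ha (h a haS)

theorem pvFold_suff (ax : List Int) (k' : Nat) (c : List Int) (i : Nat)
    (hc : c.Perm ax)
    (IH : ∀ S0 (c0 : List Int) (i0 : Nat) P0, pvMu ax S0 < k' → (c0, i0) ∈ pvUni ax →
      ∃ r, lswapGo ax.length k' c0 i0 P0 S0 = some r) :
    ∀ js : List Nat, (∀ j ∈ js, i < j ∧ j < ax.length) →
    ∀ P0 S0, pvMu ax S0 < k' →
    ∃ P1 S1, js.foldl (pvStep ax.length k' c i) (some (P0, S0)) = some (P1, S1) ∧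
      pvMu ax S1 ≤ pvMu ax S0 := by
  intro js
  induction js with
  | nil => intro _ P0 S0 _; exact ⟨P0, S0, rfl, le_refl _⟩
  | cons j js ih =>
    intro hb P0 S0 hmu0
    have hbj := hb j List.mem_cons_self
    simp only [List.foldl_cons]
    by_cases hcnd : c.getD i 0 < c.getD j 0
    · have hjc : j < c.length := by rw [hc.length_eq]; omega
      have hswap : (pvSwap c i j, 0) ∈ pvUni ax :=
        (pvMem_pvUni ax _ 0).mpr ⟨(pvSwap_perm c i j hbj.1 hjc).trans hc, by omega⟩
      obtain ⟨⟨P2, S2⟩, h2⟩ := IH S0 (pvSwap c i j) 0 P0 hmu0 hswap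
      simp only [pvStep, if_pos hcnd]
      rw [h2]
      have hmu2 : pvMu ax S2 ≤ pvMu ax S0 :=
        pvMu_mono ax S0 S2 (lswapGo_seen ax.length k' _ 0 P0 S0 P2 S2 h2)
      obtain ⟨P1, S1, hfold, hmu1⟩ :=
        ih (fun j hj => hb j (List.mem_cons_of_mem _ hj)) P2 S2 (lt_of_le_of_lt hmu2 hmu0)
      exact ⟨P1, S1, hfold, le_trans hmu1 hmu2⟩
    · simp only [pvStep, if_neg hcnd]
      exact ih (fun j hj => hb j (List.mem_cons_of_mem _ hj)) P0 S0 hmu0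

theorem lswapGo_suff (ax : List Int) : ∀ (k : Nat) (S : PySem.Set (List Int × Nat))
    (c : List Int) (i : Nat) (P : PySem.Set (List Int)),
    pvMu ax S < k → (c, i) ∈ pvUni ax →
    ∃ r, lswapGo ax.length k c i P S = some r := by
  intro k
  induction k using Nat.strong_induction_on with
  | _ k IH =>
  intro S c i P hmu hu
  obtain ⟨k', rfl⟩ : ∃ k', k = k' + 1 := ⟨k - 1, by omega⟩
  rw [lswapGo_succ]
  by_cases hS : (c, i) ∈ S
  · exact ⟨_, by rw [if_pos hS]⟩
  · rw [if_neg hS]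
    by_cases hn : ax.length ≤ i
    · exact ⟨_, by rw [if_pos hn]⟩
    · rw [if_neg hn]
      have hperm : c.Perm ax := ((pvMem_pvUni ax c i).mp hu).1
      have hmu' : pvMu ax (PySem.Set.add S (c, i)) < k' := by
        have := pvMu_add_lt ax S (c, i) hu hS; omega
      have hu' : (c, i + 1) ∈ pvUni ax :=
        (pvMem_pvUni ax c (i + 1)).mpr ⟨hperm, by omega⟩
      have IH' : ∀ S0 (c0 : List Int) (i0 : Nat) P0, pvMu ax S0 < k' → (c0, i0) ∈ pvUni ax →
          ∃ r, lswapGo ax.length k' c0 i0 P0 S0 = some r :=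
        fun S0 c0 i0 P0 h0 h1 => IH k' (by omega) S0 c0 i0 P0 h0 h1
      obtain ⟨⟨P1, S1⟩, h1⟩ := IH' _ c (i + 1) (PySem.Set.add P c) hmu' hu'
      rw [h1]
      have hmu1 : pvMu ax S1 < k' :=
        lt_of_le_of_lt
          (pvMu_mono ax _ S1 (lswapGo_seen ax.length k' c (i + 1) _ _ P1 S1 h1)) hmu'
      have hbounds : ∀ j ∈ List.range' (i + 1) (ax.length - (i + 1)), i < j ∧ j < ax.length := by
        intro j hj
        have := List.mem_range'_1.mp hj
        omega
      obtain ⟨P2, S2, hfold, _⟩ := pvFold_suff ax k' c i hperm IH' _ hbounds P1 S1 hmu1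
      exact ⟨(P2, S2), hfold⟩

theorem pvStackInv (ax c : List Int) (i : Nat) (rest : List (List Int × Nat))
    (h1 : ∀ s ∈ (c, i) :: rest, s ∈ pvUni ax) (hn : ¬ ax.length ≤ i) :
    ∀ s ∈ (c, i + 1) :: pvChildren ax.length c i ++ rest, s ∈ pvUni ax := by
  intro s hs
  have hu := h1 (c, i) List.mem_cons_self
  have h' := (pvMem_pvUni ax c i).mp hu
  rcases List.mem_cons.mp hs with rfl | hs
  · exact (pvMem_pvUni ax c (i + 1)).mpr ⟨h'.1, by omega⟩
  · rcases List.mem_append.mp hs with hs | hs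
    · exact pvChildren_mem_uni ax c i h'.1 (by omega) s hs
    · exact h1 s (List.mem_cons_of_mem _ hs)

theorem pvFold_couple (ax : List Int) (m : Nat) (c : List Int) (i : Nat)
    (CP : ∀ (c0 : List Int) P0 S0 P1 S1, lswapGo ax.length m c0 0 P0 S0 = some (P1, S1) →
      ∀ (rest : List (List Int × Nat)) (h1 : ∀ s ∈ (c0, 0) :: rest, s ∈ pvUni ax)
        (h2 : ∀ s ∈ rest, s ∈ pvUni ax),
      lswapAltGo ax ((c0, 0) :: rest) h1 P0 S0 = lswapAltGo ax rest h2 P1 S1) :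
    ∀ (js : List Nat) P0 S0 P' S',
      js.foldl (pvStep ax.length m c i) (some (P0, S0)) = some (P', S') →
      ∀ (rest : List (List Int × Nat))
        (h1 : ∀ s ∈ js.filterMap (pvChildFn c i) ++ rest, s ∈ pvUni ax)
        (h2 : ∀ s ∈ rest, s ∈ pvUni ax),
      lswapAltGo ax (js.filterMap (pvChildFn c i) ++ rest) h1 P0 S0 =
        lswapAltGo ax rest h2 P' S' := by
  intro js
  induction js with
  | nil =>
    intro P0 S0 P' S' h rest h1 h2
    simp only [List.foldl_nil, Option.some.injEq, Prod.mk.injEq] at h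
    obtain ⟨rfl, rfl⟩ := h
    rfl
  | cons j js ihjs =>
    intro P0 S0 P' S' h rest h1 h2
    simp only [List.foldl_cons] at h
    by_cases hcnd : c.getD i 0 < c.getD j 0
    · simp only [pvStep, if_pos hcnd] at h
      cases hgo : lswapGo ax.length m (pvSwap c i j) 0 P0 S0 with
      | none => rw [hgo, foldl_pvStep_none] at h; exact absurd h (by simp)
      | some r2 =>
        obtain ⟨P2, S2⟩ := r2
        rw [hgo] at h
        have hfj : pvChildFn c i j = some (pvSwap c i j, 0) := by
          unfold pvChildFn; rw [if_pos hcnd]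
        have hfm : (j :: js).filterMap (pvChildFn c i) =
            (pvSwap c i j, 0) :: js.filterMap (pvChildFn c i) := by
          rw [List.filterMap_cons, hfj]
        have h1' : ∀ s ∈ (pvSwap c i j, 0) :: js.filterMap (pvChildFn c i) ++ rest,
            s ∈ pvUni ax := by
          intro s hs
          apply h1 s
          rw [hfm, List.cons_append]
          exact hs
        have htail : ∀ s ∈ js.filterMap (pvChildFn c i) ++ rest, s ∈ pvUni ax :=
          fun s hs => h1' s (List.mem_cons_of_mem _ hs)
        have heq : lswapAltGo ax ((j :: js).filterMap (pvChildFn c i) ++ rest) h1 P0 S0 =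
            lswapAltGo ax ((pvSwap c i j, 0) :: js.filterMap (pvChildFn c i) ++ rest)
              h1' P0 S0 := by
          congr 1
          rw [hfm, List.cons_append]
        refine heq.trans ?_
        refine (CP (pvSwap c i j) P0 S0 P2 S2 hgo (js.filterMap (pvChildFn c i) ++ rest)
          h1' htail).trans ?_
        exact ihjs P2 S2 P' S' h rest htail h2
    · simp only [pvStep, if_neg hcnd] at h
      have hfj : pvChildFn c i j = none := by
        unfold pvChildFn; rw [if_neg hcnd]
      have hfm : (j :: js).filterMap (pvChildFn c i) = js.filterMap (pvChildFn c i) := by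
        rw [List.filterMap_cons, hfj]
      have heq : lswapAltGo ax ((j :: js).filterMap (pvChildFn c i) ++ rest) h1 P0 S0 =
          lswapAltGo ax (js.filterMap (pvChildFn c i) ++ rest)
            (fun s hs => h1 s (by rw [hfm]; exact hs)) P0 S0 := by
        congr 1
        rw [hfm]
      exact heq.trans (ihjs P0 S0 P' S' h rest _ h2)

theorem lswapGo_couple (ax : List Int) : ∀ (m : Nat) (c : List Int) (i : Nat)
    (P : PySem.Set (List Int)) (S : PySem.Set (List Int × Nat)) P' S',
    lswapGo ax.length m c i P S = some (P', S') →
    ∀ (rest : List (List Int × Nat)) (h1 : ∀ s ∈ (c, i) :: rest, s ∈ pvUni ax)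
      (h2 : ∀ s ∈ rest, s ∈ pvUni ax),
    lswapAltGo ax ((c, i) :: rest) h1 P S = lswapAltGo ax rest h2 P' S' := by
  intro m
  induction m with
  | zero => intro c i P S P' S' h; simp [lswapGo] at h
  | succ m ih =>
    intro c i P S P' S' h rest h1 h2
    rw [lswapGo_succ] at h
    by_cases hS : (c, i) ∈ S
    · rw [if_pos hS] at h
      simp only [Option.some.injEq, Prod.mk.injEq] at h
      obtain ⟨rfl, rfl⟩ := h
      exact lswapAltGo_skip ax c i rest h1 h2 P S hS
    · rw [if_neg hS] at h
      by_cases hn : ax.length ≤ i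
      · rw [if_pos hn] at h
        simp only [Option.some.injEq, Prod.mk.injEq] at h
        obtain ⟨rfl, rfl⟩ := h
        exact lswapAltGo_stop ax c i rest h1 h2 P S hS hn
      · rw [if_neg hn] at h
        cases hgo : lswapGo ax.length m c (i + 1) (PySem.Set.add P c) (PySem.Set.add S (c, i)) with
        | none => rw [hgo] at h; exact absurd h (by simp)
        | some r1 =>
          obtain ⟨P1, S1⟩ := r1
          rw [hgo] at h
          have hpush' := pvStackInv ax c i rest h1 hn
          have htail : ∀ s ∈ pvChildren ax.length c i ++ rest, s ∈ pvUni ax :=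
            fun s hs => hpush' s (List.mem_cons_of_mem _ hs)
          refine (lswapAltGo_push ax c i rest h1 hpush' P S hS hn).trans ?_
          refine (ih c (i + 1) _ _ P1 S1 hgo (pvChildren ax.length c i ++ rest) hpush' htail).trans ?_
          exact pvFold_couple ax m c i (fun c0 P0 S0 Pa Sa hg => ih c0 0 P0 S0 Pa Sa hg)
            _ P1 S1 P' S' h rest htail h2

-- ===== VERDICT (by name: the statement is the Claim_ definition above) =====
theorem lswap_spec : Claim_equal_lswap := by
  unfold Claim_equal_lswap Spec_lswap
  intro ax _
  have hMu : pvMu ax PySem.Set.empty = ax.permutations.dedup.length * (ax.length + 1) := by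
    have h1 : pvMu ax PySem.Set.empty = (pvUni ax).length := by
      unfold pvMu
      rw [List.filter_eq_self.mpr]
      intro a _
      simp [PySem.Set.empty]
    rw [h1]
    simp [pvUni, List.length_product]
  have hax : (ax, 0) ∈ pvUni ax := (pvMem_pvUni ax ax 0).mpr ⟨List.Perm.refl ax, by omega⟩
  obtain ⟨⟨P', S'⟩, hr⟩ := lswapGo_suff ax
    (ax.permutations.dedup.length * (ax.length + 1) + 1) PySem.Set.empty ax 0 PySem.Set.empty
    (by omega) hax
  have hcouple := lswapGo_couple ax _ ax 0 PySem.Set.empty PySem.Set.empty P' S' hr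
    [] (by simp only [List.mem_singleton]; rintro s rfl; exact hax)
    (by intro s hs; simp at hs)
  unfold lswap lswap_alt
  rw [hr, hcouple, lswapAltGo_nil]
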